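-- pv_equiv track=rewrite | github.com/MDAkramSiddiqui/python_code | array.py | smallest_unsorted_window
-- ===== SOURCE A (Python) =====
-- def smallest_unsorted_window(num_arr):
--     left, right = None, None
--     n = len(num_arr)
--     max_seen, min_seen = -float('inf'), float('inf')
--
--     for i in range(n):
--         max_seen = max(num_arr[i], max_seen)
--         if num_arr[i] < max_seen:
--             right = i
--
--     for i in range(n - 1, -1, -1):
--         min_seen = min(num_arr[i], min_seen)
--         if num_arr[i] > min_seen:
--             left = i
--
--     return left, right
-- ===== SOURCE B (Python) =====
-- def smallest_unsorted_window(num_arr):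
--     n = len(num_arr)
--     bad_left = [i for i in range(n) if any(v < num_arr[i] for v in num_arr[i + 1:])]
--     bad_right = [i for i in range(n) if any(v > num_arr[i] for v in num_arr[:i])]
--     left = bad_left[0] if bad_left else None
--     right = bad_right[-1] if bad_right else None
--     return left, right
-- ===== Notes on version B (the rewrite author's own statement) =====
-- stated objective: simpler
-- what changed: Replaces A's two stateful running-max/running-min index scans by a direct declarative characterisation: an index is in the unsorted window iff some earlier element exceeds it (right side) or some later element is below it (left side); B collects those indices with comprehensions and returns first/last.
import Mathlib
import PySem

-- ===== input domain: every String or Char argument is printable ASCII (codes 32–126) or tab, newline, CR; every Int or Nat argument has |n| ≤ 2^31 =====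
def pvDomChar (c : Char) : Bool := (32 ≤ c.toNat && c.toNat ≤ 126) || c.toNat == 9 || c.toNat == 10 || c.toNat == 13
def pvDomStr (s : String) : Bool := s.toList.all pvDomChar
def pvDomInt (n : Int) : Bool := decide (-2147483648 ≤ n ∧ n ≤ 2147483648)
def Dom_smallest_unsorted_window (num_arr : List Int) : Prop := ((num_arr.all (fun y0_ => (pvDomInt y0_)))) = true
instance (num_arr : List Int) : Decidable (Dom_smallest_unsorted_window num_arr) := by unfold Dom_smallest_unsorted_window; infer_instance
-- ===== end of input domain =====

-- B replaces A's running-max/min scans by a direct first/last-misplaced-index characterisation (no speed claim).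

-- ===== PORT A =====
-- A's first loop (i ascending, running max; -inf modelled exactly by Option Int,
-- since every comparison with -float('inf') on ints agrees with the none-case here).
def pvGoR : List Int → Nat → Option Int → Option Int → Option Int
  | [], _, _, right => right
  | x :: rest, i, maxSeen, right =>
      let m := match maxSeen with | none => x | some v => max x v
      pvGoR rest (i + 1) (some m) (if x < m then some (i : Int) else right)

-- A's second loop (i descending from n-1 to 0, running min; float('inf') as Option Int,
-- exact for the same reason); returns (min_seen, left).
def pvGoL : List Int → Nat → Option Int × Option Int
  | [], _ => (none, none)
  | x :: rest, i =>
      let st := pvGoL rest (i + 1)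
      let m := match st.1 with | none => x | some v => min x v
      (some m, if m < x then some (i : Int) else st.2)

def smallest_unsorted_window (num_arr : List Int) : Option Int × Option Int :=
  ((pvGoL num_arr 0).2, pvGoR num_arr 0 none none)

-- ===== PORT B =====
-- num_arr[i+1:] is List.drop (i+1), num_arr[:i] is List.take i (both indices nonnegative, exact).
def smallest_unsorted_window_alt (num_arr : List Int) : Option Int × Option Int :=
  let n := num_arr.length
  let badL := (List.range n).filter (fun i => (num_arr.drop (i + 1)).any (fun v => decide (v < num_arr.getD i 0)))
  let badR := (List.range n).filter (fun i => (num_arr.take i).any (fun v => decide (num_arr.getD i 0 < v)))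
  (badL.head?.map (fun i => (i : Int)), badR.getLast?.map (fun i => (i : Int)))

-- ===== PRECONDITION & SPEC =====
def Spec_smallest_unsorted_window (num_arr : List Int) (out : Option Int × Option Int) : Prop := out = smallest_unsorted_window_alt num_arr
instance (num_arr : List Int) (out : Option Int × Option Int) : Decidable (Spec_smallest_unsorted_window num_arr out) := by unfold Spec_smallest_unsorted_window; infer_instance

-- ===== CLAIM (what is proved, stated in full; the proofs are below) =====
def Claim_equal_smallest_unsorted_window : Prop := ∀ (num_arr : List Int), Dom_smallest_unsorted_window num_arr → Spec_smallest_unsorted_window num_arr (smallest_unsorted_window num_arr)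

-- ===== LEMMAS AND PROOFS =====

-- the bad-index lists of B, as named helpers for the proofs
def pvBadR (xs : List Int) : List Nat :=
  (List.range xs.length).filter (fun i => (xs.take i).any (fun v => decide (xs.getD i 0 < v)))

def pvBadL (xs : List Int) : List Nat :=
  (List.range xs.length).filter (fun i => (xs.drop (i + 1)).any (fun v => decide (v < xs.getD i 0)))

-- running max as A folds it
def pvMaxStep (acc : Option Int) (x : Int) : Option Int :=
  some (match acc with | none => x | some v => max x v)

lemma pvMaxFold_some (l : List Int) (v : Int) :
    l.foldl pvMaxStep (some v) = some (l.foldl max v) := by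
  induction l generalizing v with
  | nil => rfl
  | cons a l ih => simp [pvMaxStep, ih, max_comm]

lemma foldl_min_match (l : List Int) : ∀ v : Int,
    l.foldl min v = match l.min? with | none => v | some w => min v w := by
  induction l with
  | nil => intro v; rfl
  | cons a l ih =>
    intro v
    rw [List.foldl_cons, ih (min v a), List.min?_cons', ih a]
    cases h : l.min? with
    | none => rfl
    | some w => simp [min_assoc]

lemma pvMaxFold_eq_max? (l : List Int) : l.foldl pvMaxStep none = l.max? := by
  cases l with
  | nil => rfl
  | cons a l => rw [show (a :: l).foldl pvMaxStep none = l.foldl pvMaxStep (some a) from rfl,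
      pvMaxFold_some, List.max?_cons']

lemma lt_of_max? (l : List Int) (x M : Int) (h : l.max? = some M) :
    x < M ↔ ∃ a ∈ l, x < a := by
  rw [List.max?_eq_some_iff] at h
  constructor
  · intro hx; exact ⟨M, h.1, hx⟩
  · rintro ⟨a, ha, hxa⟩; exact lt_of_lt_of_le hxa (h.2 a ha)

lemma min?_cons_match (x : Int) (l : List Int) :
    (x :: l).min? = some (match l.min? with | none => x | some v => min x v) := by
  rw [List.min?_cons', foldl_min_match]

lemma min_lt_iff_exists (x : Int) (l : List Int) (m : Int)
    (hm : (x :: l).min? = some m) : m < x ↔ ∃ a ∈ l, a < x := by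
  rw [List.min?_eq_some_iff] at hm
  constructor
  · intro hlt
    rcases List.mem_cons.mp hm.1 with h | h
    · omega
    · exact ⟨m, h, hlt⟩
  · rintro ⟨a, ha, hax⟩
    exact lt_of_le_of_lt (hm.2 a (List.mem_cons_of_mem _ ha)) hax

lemma pvBadR_append (pre : List Int) (x : Int) :
    pvBadR (pre ++ [x]) =
      pvBadR pre ++ (if ∃ a ∈ pre, x < a then [pre.length] else []) := by
  unfold pvBadR
  rw [List.length_append, List.length_singleton, List.range_succ, List.filter_append]
  congr 1
  · apply List.filter_congr
    intro i hi
    rw [List.mem_range] at hi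
    rw [List.getD_append _ _ _ _ hi, List.take_append_of_le_length (by omega)]
  · simp only [List.filter_cons, List.filter_nil]
    have h1 : (pre ++ [x]).getD pre.length 0 = x := by
      simp
    have h2 : (pre ++ [x]).take pre.length = pre := by
      simp
    rw [h1, h2]
    by_cases h : ∃ a ∈ pre, x < a
    · simp only [if_pos h]
      have : pre.any (fun v => decide (x < v)) = true := by
        rw [List.any_eq_true]; rcases h with ⟨a, ha, hxa⟩; exact ⟨a, ha, by simpa using hxa⟩
      simp [this]
    · simp only [if_neg h]
      have : pre.any (fun v => decide (x < v)) = false := by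
        rw [List.any_eq_false]; intro a ha; simp only [decide_eq_true_eq]
        intro hxa; exact h ⟨a, ha, hxa⟩
      simp [this]

lemma pvGoR_inv (rest : List Int) : ∀ (pre : List Int),
    pvGoR rest pre.length (pre.foldl pvMaxStep none)
        ((pvBadR pre).getLast?.map (fun i => (i : Int)))
      = (pvBadR (pre ++ rest)).getLast?.map (fun i => (i : Int)) := by
  induction rest with
  | nil => intro pre; simp [pvGoR]
  | cons x rest ih =>
    intro pre
    rw [show pre ++ x :: rest = (pre ++ [x]) ++ rest by simp]
    rw [← ih (pre ++ [x])]
    have hsome : (pre ++ [x]).foldl pvMaxStep none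
        = some (match pre.foldl pvMaxStep none with | none => x | some v => max x v) := by
      rw [List.foldl_append]; rfl
    have hx : (pre ++ [x]).max?
        = some (match pre.foldl pvMaxStep none with | none => x | some v => max x v) := by
      rw [← pvMaxFold_eq_max? (pre ++ [x]), hsome]
    have hcond : (x < (match pre.foldl pvMaxStep none with | none => x | some v => max x v))
        ↔ ∃ a ∈ pre, x < a := by
      rw [lt_of_max? _ x _ hx]
      constructor
      · rintro ⟨a, ha, hxa⟩
        rcases List.mem_append.mp ha with h | h
        · exact ⟨a, h, hxa⟩
        · simp at h; omega
      · rintro ⟨a, ha, hxa⟩; exact ⟨a, List.mem_append_left _ ha, hxa⟩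
    simp only [pvGoR, List.length_append, List.length_singleton, hsome]
    congr 1
    rw [pvBadR_append]
    by_cases h : ∃ a ∈ pre, x < a
    · rw [if_pos (hcond.mpr h), if_pos h]; simp
    · rw [if_neg (fun hc => h (hcond.mp hc)), if_neg h]; simp

lemma pvBadL_cons (x : Int) (l : List Int) :
    pvBadL (x :: l) =
      (if ∃ a ∈ l, a < x then [0] else []) ++ (pvBadL l).map (· + 1) := by
  unfold pvBadL
  rw [List.length_cons, List.range_succ_eq_map, List.filter_cons]
  have h0 : ((x :: l).drop 1).any (fun v => decide (v < (x :: l).getD 0 0))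
      = l.any (fun v => decide (v < x)) := by simp
  have hmap : (List.filter (fun i => ((x :: l).drop (i + 1)).any
        (fun v => decide (v < (x :: l).getD i 0))) ((List.range l.length).map (· + 1)))
      = (pvBadL l).map (· + 1) := by
    rw [List.filter_map]
    have hp : ((fun i => ((x :: l).drop (i + 1)).any (fun v => decide (v < (x :: l).getD i 0))) ∘ (· + 1))
        = (fun i => (l.drop (i + 1)).any (fun v => decide (v < l.getD i 0))) := by
      funext i; simp [Function.comp]
    rw [hp]
    rfl
  by_cases h : ∃ a ∈ l, a < x
  · have : l.any (fun v => decide (v < x)) = true := by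
      rw [List.any_eq_true]; rcases h with ⟨a, ha, hax⟩; exact ⟨a, ha, by simpa using hax⟩
    rw [if_pos h]
    simp only [h0, this, if_pos]
    rw [hmap]; rfl
  · have : l.any (fun v => decide (v < x)) = false := by
      rw [List.any_eq_false]; intro a ha; simp only [decide_eq_true_eq]
      intro hax; exact h ⟨a, ha, hax⟩
    rw [if_neg h]
    simp only [h0, this]
    rw [hmap]; rfl

lemma pvGoL_inv (l : List Int) : ∀ (i : Nat),
    pvGoL l i = (l.min?, (pvBadL l).head?.map (fun k => ((k + i : Nat) : Int))) := by
  induction l with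
  | nil => intro i; rfl
  | cons x rest ih =>
    intro i
    simp only [pvGoL, ih (i + 1)]
    have hmin := min?_cons_match x rest
    rw [Prod.mk.injEq]
    refine ⟨?_, ?_⟩
    · rw [hmin]
    · rcases hx : (x :: rest).min? with _ | m
      · simp at hx
      · have hm : (match rest.min? with | none => x | some v => min x v) = m := by
          rw [hmin] at hx; exact Option.some.inj hx
        rw [hm]
        have hcond := min_lt_iff_exists x rest m hx
        rw [pvBadL_cons]
        by_cases h : ∃ a ∈ rest, a < x
        · rw [if_pos (hcond.mpr h), if_pos h]; simp
        · rw [if_neg (fun hc => h (hcond.mp hc)), if_neg h]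
          simp only [List.nil_append, List.head?_map, Option.map_map]
          congr 1; funext k; simp [Function.comp]; omega

-- ===== VERDICT (by name: the statement is the Claim_ definition above) =====
theorem smallest_unsorted_window_spec : Claim_equal_smallest_unsorted_window := by
  intro xs _
  show smallest_unsorted_window xs = smallest_unsorted_window_alt xs
  have halt : smallest_unsorted_window_alt xs
      = ((pvBadL xs).head?.map (fun i => (i : Int)), (pvBadR xs).getLast?.map (fun i => (i : Int))) := rfl
  have hA : smallest_unsorted_window xs = ((pvGoL xs 0).2, pvGoR xs 0 none none) := rfl
  have hR := pvGoR_inv xs []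
  simp only [List.nil_append, List.length_nil] at hR
  rw [halt, hA, pvGoL_inv xs 0,
    show (pvGoR xs 0 none none)
        = pvGoR xs 0 (List.foldl pvMaxStep none []) ((pvBadR []).getLast?.map (fun i => (i : Int))) from rfl,
    hR]
  simp only [Prod.mk.injEq, and_true, Nat.add_zero]
  cases (pvBadL xs).head? <;> rfl
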